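-- pv_equiv track=rewrite | github.com/alexandraback/datacollection | solutions_2749486_0/Python/fiji/B.py | subsolve
-- ===== SOURCE A (Python) =====
-- def subsolve(p, j, inc, dec):
--     if p < 0:
--         tv = inc
--         inc = dec
--         dec = tv
--         p = -1 * p
--
--     r = []
--     s = 0
--     while  s+j <= p:
--         s += j
--         j += 1
--         r.append(inc)
--
--     t = p - s
--     for i in range(t):
--         r.extend([dec,inc])
--         j += 2
--     return (r,j)
-- ===== SOURCE B (Python) =====
-- def subsolve(p, j, inc, dec):
--     if p < 0:
--         p, inc, dec = -p, dec, inc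
--     # k = minimal number of "increment" steps, i.e. the least k >= 0 with
--     # s_(k+1) > p where s_m = m*j + m*(m-1)//2; equivalently (k+1)*(k+2*j) > 2*p.
--     # Found by binary search on that monotone predicate instead of a linear scan.
--     if (0 + 1) * (0 + 2 * j) > 2 * p:
--         k = 0
--     else:
--         lo, hi = 0, 2 * p + 2 * abs(j) + 1
--         while hi - lo > 1:
--             mid = (lo + hi) // 2
--             if (mid + 1) * (mid + 2 * j) > 2 * p:
--                 hi = mid
--             else:
--                 lo = mid
--         k = hi
--     s = k * j + k * (k - 1) // 2
--     t = p - s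
--     return [inc] * k + [dec, inc] * t, j + k + 2 * t
-- ===== Notes on version B (the rewrite author's own statement) =====
-- stated objective: faster
-- what changed: Replaces A's linear while-loop that counts increment steps one at a time by a binary search for the least step count k with (k+1)*(k+2*j) > 2*p, then computes the partial sum in closed form and builds the result list directly as [inc]*k + [dec,inc]*t instead of repeated append/extend.
import Mathlib
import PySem

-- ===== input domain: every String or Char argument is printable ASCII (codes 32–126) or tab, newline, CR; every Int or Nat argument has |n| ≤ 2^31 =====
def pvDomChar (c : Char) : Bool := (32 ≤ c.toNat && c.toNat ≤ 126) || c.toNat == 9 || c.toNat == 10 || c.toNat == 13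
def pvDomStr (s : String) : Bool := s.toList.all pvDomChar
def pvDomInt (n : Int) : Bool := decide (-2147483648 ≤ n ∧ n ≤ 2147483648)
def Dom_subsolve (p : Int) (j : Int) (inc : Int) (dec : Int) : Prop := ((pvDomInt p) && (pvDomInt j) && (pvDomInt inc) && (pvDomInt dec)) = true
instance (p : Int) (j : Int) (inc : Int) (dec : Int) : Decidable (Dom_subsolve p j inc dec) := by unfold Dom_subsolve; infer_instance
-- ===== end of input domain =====

-- B replaces A's linear step-counting while-loop by a binary search for the step count k
-- (the least k with (k+1)(k+2j) > 2p) and builds the move list directly; same return value.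

-- ===== PORT A =====
-- A's while loop: state (s, j, r); appends inc each iteration.
def subsolveLoopA (p : Int) (inc : Int) (s : Int) (j : Int) (r : List Int) : Int × Int × List Int :=
  if s + j ≤ p then subsolveLoopA p inc (s + j) (j + 1) (r ++ [inc]) else (s, j, r)
termination_by ((1 - j).toNat, (p - s - j + 1).toNat)
decreasing_by
  by_cases hj : j ≤ 0
  · exact Prod.Lex.left _ _ (by omega)
  · have h1 : (1 - (j + 1)).toNat = (1 - j).toNat := by omega
    rw [h1]
    exact Prod.Lex.right _ (by omega)

def subsolve (p : Int) (j : Int) (inc : Int) (dec : Int) : List Int × Int :=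
  -- Python reassigns p/inc/dec when p < 0; modelled by the three ifs below.
  let p2 := if p < 0 then -1 * p else p
  let inc2 := if p < 0 then dec else inc
  let dec2 := if p < 0 then inc else dec
  let res := subsolveLoopA p2 inc2 0 j []
  let s := res.1
  let j2 := res.2.1
  let r := res.2.2
  let t := p2 - s
  let res2 := (PySem.List.pyRange 0 t 1).foldl
    (fun (st : List Int × Int) _ => (st.1 ++ [dec2, inc2], st.2 + 2)) (r, j2)
  (res2.1, res2.2)

-- ===== PORT B =====
-- Source B's binary-search loop: while hi - lo > 1.
def pvBsLoop (p : Int) (j : Int) (lo : Int) (hi : Int) : Int :=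
  if 1 < hi - lo then
    let mid := PySem.Int.floordiv (lo + hi) 2
    if (mid + 1) * (mid + 2 * j) > 2 * p then pvBsLoop p j lo mid
    else pvBsLoop p j mid hi
  else hi
termination_by (hi - lo).toNat
decreasing_by
  all_goals
    have hb := PySem.Int.floordiv_two_mid_bounds (lo := lo + 1) (hi := hi - 1) (by omega)
    have hsum : lo + 1 + (hi - 1) = lo + hi := by ring
    rw [hsum] at hb
    omega

def subsolve_alt (p : Int) (j : Int) (inc : Int) (dec : Int) : List Int × Int :=
  let p2 := if p < 0 then -p else p
  let inc2 := if p < 0 then dec else inc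
  let dec2 := if p < 0 then inc else dec
  let k := if (0 + 1) * (0 + 2 * j) > 2 * p2 then (0 : Int)
           else pvBsLoop p2 j 0 (2 * p2 + 2 * |j| + 1)
  let s := k * j + PySem.Int.floordiv (k * (k - 1)) 2
  let t := p2 - s
  (PySem.List.pyRepeat [inc2] k ++ PySem.List.pyRepeat [dec2, inc2] t, j + k + 2 * t)

-- ===== PRECONDITION & SPEC =====
def Spec_subsolve (p : Int) (j : Int) (inc : Int) (dec : Int) (out : List Int × Int) : Prop := out = subsolve_alt p j inc dec
instance (p : Int) (j : Int) (inc : Int) (dec : Int) (out : List Int × Int) : Decidable (Spec_subsolve p j inc dec out) := by unfold Spec_subsolve; infer_instance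

-- ===== CLAIM (what is proved, stated in full; the proofs are below) =====
def Claim_equal_subsolve : Prop := ∀ (p : Int) (j : Int) (inc : Int) (dec : Int), Dom_subsolve p j inc dec → Spec_subsolve p j inc dec (subsolve p j inc dec)

-- ===== LEMMAS AND PROOFS =====

-- partial sums of A's loop: pvS j0 k = sum_{i<k} (j0 + i)
def pvS (j0 : Int) : Nat → Int
  | 0 => 0
  | (k+1) => pvS j0 k + (j0 + (k : Int))

lemma pvS_two (j0 : Int) (k : Nat) :
    2 * pvS j0 k = (k : Int) * ((k : Int) - 1) + 2 * j0 * (k : Int) := by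
  induction k with
  | zero => simp [pvS]
  | succ n ih =>
    simp only [pvS]
    push_cast
    push_cast at ih
    ring_nf
    ring_nf at ih
    linarith

lemma two_pvS_succ (j0 : Int) (k : Nat) :
    2 * pvS j0 (k + 1) = ((k : Int) + 1) * ((k : Int) + 2 * j0) := by
  have h := pvS_two j0 (k + 1)
  push_cast at h
  linear_combination h

lemma pred_mono (P j0 a b : Int) (hP : 0 ≤ P) (ha : 0 ≤ a) (hab : a ≤ b)
    (h : 2 * P < (a + 1) * (a + 2 * j0)) : 2 * P < (b + 1) * (b + 2 * j0) := by
  have h1 : 0 < a + 2 * j0 := by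
    by_contra h2
    push Not at h2
    have : (a + 1) * (a + 2 * j0) ≤ 0 :=
      mul_nonpos_iff.mpr (Or.inl ⟨by linarith, h2⟩)
    linarith
  have h3 : (a + 1) * (a + 2 * j0) ≤ (b + 1) * (b + 2 * j0) :=
    mul_le_mul (by linarith) (by linarith) (by linarith) (by linarith)
  linarith

lemma pred_at_bound (P j0 : Int) (hP : 0 ≤ P) :
    2 * P < (2 * P + 2 * |j0| + 1 + 1) * (2 * P + 2 * |j0| + 1 + 2 * j0) := by
  have h1 : -|j0| ≤ j0 := neg_abs_le j0
  have h0 : 0 ≤ |j0| := abs_nonneg j0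
  have hA : (1 : Int) ≤ 2 * P + 2 * |j0| + 1 + 1 := by omega
  have hB : 2 * P + 1 ≤ 2 * P + 2 * |j0| + 1 + 2 * j0 := by omega
  nlinarith

lemma pred_exists (P j0 : Int) (hP : 0 ≤ P) :
    ∃ n : Nat, 2 * P < ((n : Int) + 1) * ((n : Int) + 2 * j0) := by
  refine ⟨(2 * P + 2 * |j0| + 1).toNat, ?_⟩
  have h0 : 0 ≤ |j0| := abs_nonneg j0
  have hc : (((2 * P + 2 * |j0| + 1).toNat : Nat) : Int) = 2 * P + 2 * |j0| + 1 :=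
    Int.toNat_of_nonneg (by omega)
  rw [hc]
  exact pred_at_bound P j0 hP

-- the loop runs exactly Nat.find hex iterations
lemma loopA_eq (P j0 iv : Int) (_hP : 0 ≤ P)
    (hex : ∃ n : Nat, 2 * P < ((n : Int) + 1) * ((n : Int) + 2 * j0)) :
    ∀ (n k : Nat) (r : List Int), Nat.find hex - k = n → k ≤ Nat.find hex →
      subsolveLoopA P iv (pvS j0 k) (j0 + (k : Int)) r
        = (pvS j0 (Nat.find hex), j0 + ((Nat.find hex : Nat) : Int),
           r ++ List.replicate (Nat.find hex - k) iv) := by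
  intro n
  induction n with
  | zero =>
    intro k r hn hk
    have hkK : k = Nat.find hex := by omega
    subst hkK
    have hs := Nat.find_spec hex
    rw [← two_pvS_succ] at hs
    rw [subsolveLoopA, if_neg (by simp only [pvS] at *; omega)]
    simp
  | succ n ih =>
    intro k r hn hk
    have hklt : k < Nat.find hex := by omega
    have hm := Nat.find_min hex hklt
    rw [← two_pvS_succ] at hm
    have hguard : pvS j0 k + (j0 + (k : Int)) ≤ P := by
      simp only [pvS] at hm ⊢; omega
    rw [subsolveLoopA, if_pos hguard]
    have hstep : pvS j0 k + (j0 + (k : Int)) = pvS j0 (k + 1) := by simp [pvS]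
    have hj : j0 + (k : Int) + 1 = j0 + ((k + 1 : Nat) : Int) := by push_cast; ring
    rw [hstep, hj, ih (k + 1) (r ++ [iv]) (by omega) (by omega)]
    have hrep : Nat.find hex - k = (Nat.find hex - (k + 1)) + 1 := by omega
    rw [hrep, List.replicate_succ, List.append_assoc]
    simp

-- A's for-loop over range(t)
lemma foldl_ext (d i : Int) (l : List Int) : ∀ (r : List Int) (jv : Int),
    l.foldl (fun (st : List Int × Int) _ => (st.1 ++ [d, i], st.2 + 2)) (r, jv)
      = (r ++ (List.replicate l.length [d, i]).flatten, jv + 2 * l.length) := by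
  induction l with
  | nil => intro r jv; simp
  | cons x xs ih =>
    intro r jv
    simp only [List.foldl_cons, ih, List.length_cons, List.replicate_succ,
      List.flatten_cons, List.append_assoc]
    congr 1
    push_cast; ring

-- the binary search returns the least k with the predicate
lemma bsLoop_eq (P j0 : Int) (hP : 0 ≤ P)
    (hex : ∃ n : Nat, 2 * P < ((n : Int) + 1) * ((n : Int) + 2 * j0)) :
    ∀ (n : Nat) (lo hi : Int), (hi - lo).toNat = n → 0 ≤ lo → lo < hi →
      ¬(2 * P < (lo + 1) * (lo + 2 * j0)) → (2 * P < (hi + 1) * (hi + 2 * j0)) →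
      pvBsLoop P j0 lo hi = ((Nat.find hex : Nat) : Int) := by
  intro n
  induction n using Nat.strong_induction_on with
  | _ n ih =>
    intro lo hi hn h0 hlt hlo hhi
    rw [pvBsLoop]
    by_cases hgap : 1 < hi - lo
    · rw [if_pos hgap]
      have hb := PySem.Int.floordiv_two_mid_bounds (lo := lo + 1) (hi := hi - 1) (by omega)
      have hsum : lo + 1 + (hi - 1) = lo + hi := by ring
      rw [hsum] at hb
      set mid := PySem.Int.floordiv (lo + hi) 2 with hmid
      by_cases hm : (mid + 1) * (mid + 2 * j0) > 2 * P
      · rw [if_pos hm]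
        exact ih (mid - lo).toNat (by omega) lo mid rfl h0 (by omega) hlo hm
      · rw [if_neg hm]
        exact ih (hi - mid).toNat (by omega) mid hi rfl (by omega) (by omega)
          hm hhi
    · rw [if_neg hgap]
      have hhi1 : hi = lo + 1 := by omega
      have h0hi : 0 ≤ hi := by omega
      have hfind : Nat.find hex = hi.toNat := by
        rw [Nat.find_eq_iff]
        constructor
        · rw [Int.toNat_of_nonneg h0hi]; exact hhi
        · intro m hm hpm
          have hmlo : (m : Int) ≤ lo := by omega
          exact hlo (pred_mono P j0 (m : Int) lo hP (by positivity) hmlo hpm)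
      rw [hfind, Int.toNat_of_nonneg h0hi]

-- B's closed-form partial sum agrees with pvS
lemma floordiv_formula (j0 : Int) (k : Nat) :
    (k : Int) * j0 + PySem.Int.floordiv ((k : Int) * ((k : Int) - 1)) 2 = pvS j0 k := by
  have h2 : (k : Int) * ((k : Int) - 1) = 2 * (pvS j0 k - j0 * (k : Int)) := by
    have h := pvS_two j0 k
    ring_nf
    ring_nf at h
    linarith
  rw [h2]
  simp only [PySem.Int.floordiv]
  rw [Int.mul_fdiv_cancel_left _ (by norm_num)]
  ring

-- A's loop never overshoots: the final partial sum is at most P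
lemma pvS_find_le (P j0 : Int) (hP : 0 ≤ P)
    (hex : ∃ n : Nat, 2 * P < ((n : Int) + 1) * ((n : Int) + 2 * j0)) :
    pvS j0 (Nat.find hex) ≤ P := by
  cases hK : Nat.find hex with
  | zero => simpa [pvS] using hP
  | succ m =>
    have hmin := Nat.find_min hex (by omega : m < Nat.find hex)
    rw [← two_pvS_succ] at hmin
    omega

-- the common core: both ports agree once the sign fix has produced P ≥ 0
lemma core_eq (P j0 iv dv : Int) (hP : 0 ≤ P) :
    (let res := subsolveLoopA P iv 0 j0 []
     let s := res.1
     let j2 := res.2.1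
     let r := res.2.2
     let t := P - s
     let res2 := (PySem.List.pyRange 0 t 1).foldl
       (fun (st : List Int × Int) _ => (st.1 ++ [dv, iv], st.2 + 2)) (r, j2)
     ((res2.1, res2.2) : List Int × Int))
    =
    (let k := if (0 + 1) * (0 + 2 * j0) > 2 * P then (0 : Int)
              else pvBsLoop P j0 0 (2 * P + 2 * |j0| + 1)
     let s := k * j0 + PySem.Int.floordiv (k * (k - 1)) 2
     let t := P - s
     ((PySem.List.pyRepeat [iv] k ++ PySem.List.pyRepeat [dv, iv] t, j0 + k + 2 * t)
       : List Int × Int)) := by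
  have hex := pred_exists P j0 hP
  set K := Nat.find hex with hKdef
  -- evaluate A's while loop
  have hA := loopA_eq P j0 iv hP hex K 0 [] (by omega) (by omega)
  simp only [pvS, Nat.cast_zero, add_zero, List.nil_append, Nat.sub_zero] at hA
  -- B's k equals K
  have hk : (if (0 + 1) * (0 + 2 * j0) > 2 * P then (0 : Int)
             else pvBsLoop P j0 0 (2 * P + 2 * |j0| + 1)) = ((K : Nat) : Int) := by
    by_cases h0 : (0 + 1) * (0 + 2 * j0) > 2 * P
    · rw [if_pos h0]
      have : K = 0 := by
        rw [hKdef, Nat.find_eq_zero]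
        simpa using h0
      rw [this]; simp
    · rw [if_neg h0]
      have h0' : 0 ≤ |j0| := abs_nonneg j0
      exact bsLoop_eq P j0 hP hex (2 * P + 2 * |j0| + 1 - 0).toNat 0
        (2 * P + 2 * |j0| + 1) rfl le_rfl (by omega)
        (by simpa using h0) (pred_at_bound P j0 hP)
  have hsle := pvS_find_le P j0 hP hex
  rw [← hKdef] at hsle
  rw [← hKdef] at hA
  have hlenN : (PySem.List.pyRange 0 (P - pvS j0 K) 1).length = (P - pvS j0 K).toNat := by
    rw [PySem.List.length_pyRange_one]; omega
  have hcast : (((P - pvS j0 K).toNat : Nat) : Int) = P - pvS j0 K :=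
    Int.toNat_of_nonneg (by omega)
  -- now reduce both sides
  simp only [hA, hk]
  rw [foldl_ext, floordiv_formula j0 K]
  simp only [PySem.List.pyRepeat, Int.toNat_natCast,
    hlenN, hcast]
  rw [List.flatten_replicate_singleton]

-- ===== VERDICT (by name: the statement is the Claim_ definition above) =====
theorem subsolve_spec : Claim_equal_subsolve := by
  intro p j inc dec _
  unfold Spec_subsolve subsolve subsolve_alt
  by_cases hp : p < 0
  · simp only [if_pos hp]
    have hneg : -1 * p = -p := by ring
    rw [hneg]
    exact core_eq (-p) j dec inc (by omega)
  · simp only [if_neg hp]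
    exact core_eq p j inc dec (by omega)
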